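-- pv_equiv track=rewrite | github.com/WillyMaikowski/cc5509 | digitRecognition/utils.py | mBlackTopLeft
-- ===== SOURCE A (Python) =====
-- BACKGROUND = 240
--
-- FOREGROUND = 0
--
-- MARKED = 1
--
-- def mBlackTopLeft( img ):
--     aux = img.copy()
--     for i in range( len( aux ) ):
--         for j in range( len( aux[i] ) ):
--             if i-1 < 0 or j-1 < 0 or aux[i][j] == FOREGROUND:
--                 continue
--             elif aux[i][j] == BACKGROUND and ( aux[i - 1][j - 1] == FOREGROUND or aux[i - 1][j - 1] == MARKED ):
--                 aux[i][j] = MARKED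
--     return aux
-- ===== SOURCE B (Python) =====
-- BACKGROUND = 240
--
-- FOREGROUND = 0
--
-- MARKED = 1
--
-- def mBlackTopLeft(img):
--     # Closed-form per-cell computation from the ORIGINAL image: a cell becomes
--     # MARKED iff it is an interior BACKGROUND cell whose up-left diagonal chain of
--     # interior BACKGROUND cells ends at a FOREGROUND or MARKED value.
--     def cell(i, j, v):
--         if v != BACKGROUND or i < 1 or j < 1:
--             return v
--         a, b = i - 1, j - 1
--         while True:
--             u = img[a][b]
--             if u == FOREGROUND or u == MARKED:
--                 return MARKED
--             if u == BACKGROUND and a >= 1 and b >= 1: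
--                 a -= 1
--                 b -= 1
--             else:
--                 return v
--     return [[cell(i, j, v) for j, v in enumerate(row)] for i, row in enumerate(img)]
-- ===== Notes on version B (the rewrite author's own statement) =====
-- stated objective: alternative
-- what changed: B replaces A's stateful in-place propagation pass (marks written into the array and read back as aux[i-1][j-1]) by a closed-form per-cell computation from the original image: each cell independently walks its up-left diagonal chain of interior BACKGROUND cells and is MARKED iff the chain ends at a FOREGROUND/MARKED value; no mutation, no propagation state. A mutates its argument's rows in place, B does not (return-value equivalence).
import Mathlib
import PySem

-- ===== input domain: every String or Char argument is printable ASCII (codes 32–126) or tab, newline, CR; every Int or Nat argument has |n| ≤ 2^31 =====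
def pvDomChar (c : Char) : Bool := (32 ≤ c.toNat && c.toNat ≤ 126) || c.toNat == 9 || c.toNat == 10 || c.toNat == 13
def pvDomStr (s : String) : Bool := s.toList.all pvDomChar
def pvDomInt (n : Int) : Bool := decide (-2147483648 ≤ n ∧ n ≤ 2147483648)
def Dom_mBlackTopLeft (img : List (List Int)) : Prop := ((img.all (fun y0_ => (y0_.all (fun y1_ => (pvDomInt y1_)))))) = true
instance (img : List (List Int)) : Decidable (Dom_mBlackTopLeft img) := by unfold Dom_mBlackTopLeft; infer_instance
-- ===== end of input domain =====

-- B replaces A's in-place propagation pass by a closed-form per-cell ancestor-chain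
-- scan over the ORIGINAL image; same return value (A also mutates its argument's rows
-- in place — the equivalence proved here is about the RETURN value only).

-- ===== PORT A =====
-- literal transliteration of A: aux = img; nested index loops; aux[i][j] := MARKED
def mBlackTopLeft (img : List (List Int)) : List (List Int) :=
  (PySem.List.pyRange 0 (img.length : Int) 1).foldl (fun aux i =>
    (PySem.List.pyRange 0 ((PySem.List.pyGetD aux i []).length : Int) 1).foldl (fun aux j =>
      if i - 1 < 0 ∨ j - 1 < 0 ∨ PySem.List.pyGetD (PySem.List.pyGetD aux i []) j 0 = 0 then
        aux
      else if PySem.List.pyGetD (PySem.List.pyGetD aux i []) j 0 = 240 ∧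
              (PySem.List.pyGetD (PySem.List.pyGetD aux (i - 1) []) (j - 1) 0 = 0 ∨
               PySem.List.pyGetD (PySem.List.pyGetD aux (i - 1) []) (j - 1) 0 = 1) then
        PySem.List.pySetD aux i (PySem.List.pySetD (PySem.List.pyGetD aux i []) j 1)
      else aux) aux) img

-- ===== PORT B =====
-- the 'while True' walk of Source B: up-left along the diagonal while interior BACKGROUND
def cellWalk (img : List (List Int)) (a b : Nat) (v : Int) : Int :=
  let u := PySem.List.pyGetD (PySem.List.pyGetD img (a : Int) []) (b : Int) 0
  if u = 0 ∨ u = 1 then 1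
  else if u = 240 ∧ 1 ≤ a ∧ 1 ≤ b then cellWalk img (a - 1) (b - 1) v
  else v
termination_by a
decreasing_by omega

-- Source B's 'cell': boundary / non-background cells unchanged, otherwise walk
def cellB (img : List (List Int)) (i j : Nat) (v : Int) : Int :=
  if v ≠ 240 ∨ i < 1 ∨ j < 1 then v else cellWalk img (i - 1) (j - 1) v

def mBlackTopLeft_alt (img : List (List Int)) : List (List Int) :=
  img.mapIdx (fun i row => row.mapIdx (fun j v => cellB img i j v))

-- ===== PRECONDITION & SPEC =====
-- Pre_ excludes exactly the inputs where A raises IndexError: a cell equal to 240 at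
-- (i,j), i,j ≥ 1, whose up-left neighbour column j-1 does not exist in row i-1.
def Pre_mBlackTopLeft (img : List (List Int)) : Prop :=
  ∀ i, i < img.length → ∀ j, j < (img.getD i []).length →
    1 ≤ i → 1 ≤ j → (img.getD i []).getD j 0 = 240 → j - 1 < (img.getD (i - 1) []).length
instance (img : List (List Int)) : Decidable (Pre_mBlackTopLeft img) := by unfold Pre_mBlackTopLeft; infer_instance
def pvWitness_mBlackTopLeft : List (List Int) := [[0, 5], [240, 240]]

def Spec_mBlackTopLeft (img : List (List Int)) (out : List (List Int)) : Prop := out = mBlackTopLeft_alt img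
instance (img : List (List Int)) (out : List (List Int)) : Decidable (Spec_mBlackTopLeft img out) := by unfold Spec_mBlackTopLeft; infer_instance

-- ===== CLAIM (what is proved, stated in full; the proofs are below) =====
def Claim_equal_mBlackTopLeft : Prop := ∀ (img : List (List Int)), Dom_mBlackTopLeft img → Pre_mBlackTopLeft img → Spec_mBlackTopLeft img (mBlackTopLeft img)

-- ===== LEMMAS AND PROOFS =====
-- Proof-only model: the row-wise final-image computation; A's loops and B's per-cell
-- closed form are each proved equal to it.

def updF (prev : List Int) (j : Nat) (v : Int) : Int :=
  if j ≠ 0 ∧ v = 240 ∧ (prev.getD (j-1) 0 = 0 ∨ prev.getD (j-1) 0 = 1) then 1 else v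

def rowA (prev xs : List Int) : List Int := xs.mapIdx (updF prev)

def modelStep (prev row : List Int) : List Int :=
  match row with
  | [] => []
  | h :: t =>
      let mid := (t.zip prev).map (fun vp => if vp.1 = 240 ∧ (vp.2 = 0 ∨ vp.2 = 1) then 1 else vp.1)
      h :: (mid ++ t.drop mid.length)

def modelGo (prev : List Int) (rows : List (List Int)) : List (List Int) :=
  match rows with
  | [] => []
  | r :: rest =>
      let n := modelStep prev r
      n :: modelGo n rest

def modelRun (img : List (List Int)) : List (List Int) :=
  match img with
  | [] => []
  | r :: rest => r :: modelGo r rest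

lemma length_rowA (prev xs : List Int) : (rowA prev xs).length = xs.length := by
  simp [rowA]

lemma length_modelStep (prev row : List Int) : (modelStep prev row).length = row.length := by
  cases row with
  | nil => rfl
  | cons h t => simp [modelStep]

lemma length_modelGo (prev : List Int) (rows : List (List Int)) :
    (modelGo prev rows).length = rows.length := by
  induction rows generalizing prev with
  | nil => rfl
  | cons r rest ih => simp [modelGo, ih]

lemma length_model (img : List (List Int)) : (modelRun img).length = img.length := by
  cases img with
  | nil => rfl
  | cons r rest => simp [modelRun, length_modelGo]

lemma rowlen_modelGo (rows : List (List Int)) : ∀ (prev : List Int) (k : Nat),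
    ((modelGo prev rows).getD k []).length = ((rows.getD k [] : List Int)).length := by
  induction rows with
  | nil => intro prev k; rfl
  | cons r rest ih =>
      intro prev k
      cases k with
      | zero => simp [modelGo, length_modelStep]
      | succ k => simpa [modelGo] using ih (modelStep prev r) k

lemma rowlen_model (img : List (List Int)) (k : Nat) :
    ((modelRun img).getD k []).length = ((img.getD k [] : List Int)).length := by
  cases img with
  | nil => rfl
  | cons r rest =>
      cases k with
      | zero => rfl
      | succ k => simpa [modelRun] using rowlen_modelGo rest r k

lemma modelGo_getD_succ (rows : List (List Int)) : ∀ (prev : List Int) (k : Nat),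
    k + 1 < rows.length →
    (modelGo prev rows).getD (k+1) [] =
      modelStep ((modelGo prev rows).getD k []) (rows.getD (k+1) []) := by
  induction rows with
  | nil => intro prev k h; simp at h
  | cons r rest ih =>
      intro prev k h
      cases k with
      | zero =>
          cases rest with
          | nil => simp at h
          | cons r2 rest2 => simp [modelGo]
      | succ k =>
          have h' : k + 1 < rest.length := by simpa using h
          simpa [modelGo] using ih (modelStep prev r) k h'

lemma model_getD_succ (img : List (List Int)) (k : Nat) (h : k + 1 < img.length) :
    (modelRun img).getD (k+1) [] =
      modelStep ((modelRun img).getD k []) (img.getD (k+1) []) := by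
  cases img with
  | nil => simp at h
  | cons r rest =>
      cases k with
      | zero =>
          cases rest with
          | nil => simp at h
          | cons r2 rest2 => simp [modelRun, modelGo]
      | succ k =>
          have h' : k + 1 < rest.length := by simpa using h
          simpa [modelRun] using modelGo_getD_succ rest r k h'

lemma rowEq (prev row : List Int)
    (hp : ∀ j, j < row.length → 1 ≤ j → row.getD j 0 = 240 → j - 1 < prev.length) :
    rowA prev row = modelStep prev row := by
  cases row with
  | nil => rfl
  | cons h t =>
      show rowA prev (h :: t) = modelStep prev (h :: t)
      rw [rowA, List.mapIdx_cons]
      have h0 : updF prev 0 h = h := by simp [updF]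
      rw [h0]
      simp only [modelStep]
      congr 1
      apply List.ext_getElem (by simp)
      intro k hk1 hk2
      have hkt : k < t.length := by simpa using hk1
      have hmid : ((t.zip prev).map (fun vp => if vp.1 = 240 ∧ (vp.2 = 0 ∨ vp.2 = 1) then 1 else vp.1)).length = min t.length prev.length := by
        simp
      rw [List.getElem_mapIdx]
      by_cases hkp : k < prev.length
      · have hkm : k < ((t.zip prev).map (fun vp => if vp.1 = 240 ∧ (vp.2 = 0 ∨ vp.2 = 1) then 1 else vp.1)).length := by
          rw [hmid]; omega
        rw [List.getElem_append_left hkm]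
        simp [updF, List.getElem_zip, List.getElem?_eq_getElem hkp]
      · have hkm : ((t.zip prev).map (fun vp => if vp.1 = 240 ∧ (vp.2 = 0 ∨ vp.2 = 1) then 1 else vp.1)).length ≤ k := by
          rw [hmid]; omega
        rw [List.getElem_append_right hkm]
        have hgd : (h :: t).getD (k+1) 0 = t[k] := by
          simp [List.getElem?_eq_getElem hkt]
        have hne : t[k] ≠ 240 := by
          intro h240
          have := hp (k+1) (by simpa using Nat.succ_lt_succ hkt) (by omega) (by rw [hgd]; exact h240)
          omega
        have hnone : prev[k]? = none := by
          rw [List.getElem?_eq_none_iff]; omega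
        simp [List.getElem_drop, updF, hnone, hne]
        congr 1
        omega

lemma innerLoop (i : Nat) (hi : 1 ≤ i) (aux : List (List Int)) (hia : i < aux.length) :
    ∀ (b : Nat), b ≤ (aux.getD i []).length →
    (PySem.List.pyRange 0 (b : Int) 1).foldl (fun aux j =>
      if (i : Int) - 1 < 0 ∨ j - 1 < 0 ∨ PySem.List.pyGetD (PySem.List.pyGetD aux (i : Int) []) j 0 = 0 then
        aux
      else if PySem.List.pyGetD (PySem.List.pyGetD aux (i : Int) []) j 0 = 240 ∧
              (PySem.List.pyGetD (PySem.List.pyGetD aux ((i : Int) - 1) []) (j - 1) 0 = 0 ∨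
               PySem.List.pyGetD (PySem.List.pyGetD aux ((i : Int) - 1) []) (j - 1) 0 = 1) then
        PySem.List.pySetD aux (i : Int) (PySem.List.pySetD (PySem.List.pyGetD aux (i : Int) []) j 1)
      else aux) aux
    = aux.set i (rowA (aux.getD (i-1) []) ((aux.getD i []).take b) ++ (aux.getD i []).drop b) := by
  intro b
  induction b with
  | zero =>
      intro _
      rw [show ((0:Nat):Int) = 0 from rfl, PySem.List.pyRange_one_eq_nil le_rfl]
      simp only [List.foldl_nil, List.take_zero, List.drop_zero, rowA, List.mapIdx_nil,
        List.nil_append]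
      rw [List.getD_eq_getElem aux [] hia, List.set_getElem_self]
  | succ b ih =>
      intro hb1
      have hb : b < (aux.getD i []).length := by omega
      have hr : PySem.List.pyRange 0 ((b+1 : Nat) : Int) 1
          = PySem.List.pyRange 0 (b:Int) 1 ++ [(b:Int)] := by
        push_cast
        exact PySem.List.pyRange_one_succ_right (by positivity)
      rw [hr, List.foldl_append, ih (by omega)]
      simp only [List.foldl_cons, List.foldl_nil]
      set prev := aux.getD (i-1) [] with hprev
      set row := aux.getD i [] with hrow
      set nr := rowA prev (row.take b) ++ row.drop b with hnr
      have hrAlen : (rowA prev (row.take b)).length = b := by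
        simp [length_rowA]; omega
      have hnrlen : nr.length = row.length := by
        simp [hnr, hrAlen]; omega
      have f1 : (aux.set i nr).getD i [] = nr := by
        rw [List.getD_eq_getElem _ _ (by simpa using hia)]
        simp
      have f2 : nr.getD b 0 = row[b] := by
        rw [List.getD_eq_getElem _ _ (by omega)]
        rw [List.getElem_append_right (by omega)]
        simp only [List.getElem_drop]
        congr 1
        omega
      have f3 : (aux.set i nr).getD (i-1) [] = prev := by
        rw [List.getD_eq_getElem?_getD, List.getElem?_set_ne (by omega), ← List.getD_eq_getElem?_getD]
      have e1 : (i:Int) - 1 = ((i-1 : Nat) : Int) := by omega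
      have htake : row.take (b+1) = row.take b ++ [row[b]] := by
        rw [List.take_add_one, List.getElem?_eq_getElem hb]
        rfl
      have hlt : (List.take b row).length = b := by
        rw [List.length_take]; omega
      have hrA2 : rowA prev (row.take (b+1)) = rowA prev (row.take b) ++ [updF prev b row[b]] := by
        rw [htake, rowA, List.mapIdx_append, hlt]
        simp [rowA]
      have hdropb : row.drop b = row[b] :: row.drop (b+1) := List.drop_eq_getElem_cons hb
      by_cases hb0 : b = 0
      · subst hb0
        rw [if_pos (Or.inr (Or.inl (by norm_num)))]
        rw [hnr, hrA2, hdropb]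
        simp [updF, rowA]
      · have e2 : (b:Int) - 1 = ((b-1 : Nat) : Int) := by omega
        have hii : ¬((i:Int) - 1 < 0) := by omega
        have hjj : ¬((b:Int) - 1 < 0) := by omega
        have hpv : PySem.List.pyGetD (PySem.List.pyGetD (aux.set i nr) ((i:Int) - 1) []) ((b:Int) - 1) 0
            = prev.getD (b-1) 0 := by
          rw [e1, e2, PySem.List.pyGetD_natCast, PySem.List.pyGetD_natCast, f3]
        have hv : PySem.List.pyGetD (PySem.List.pyGetD (aux.set i nr) (i:Int) []) (b:Int) 0 = row[b] := by
          rw [PySem.List.pyGetD_natCast, PySem.List.pyGetD_natCast, f1, f2]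
      -- (continued as before)
        by_cases hv0 : row[b] = 0
        · rw [if_pos (by rw [hv]; exact Or.inr (Or.inr hv0))]
          rw [hnr, hrA2, hdropb]
          have : updF prev b row[b] = row[b] := by simp [updF, hv0]
          rw [this]
          simp
        · rw [if_neg (by rw [hv]; rintro (h|h|h); exacts [hii h, hjj h, hv0 h])]
          by_cases hc : row[b] = 240 ∧ (prev.getD (b-1) 0 = 0 ∨ prev.getD (b-1) 0 = 1)
          · rw [if_pos (by rw [hv, hpv]; exact hc)]
            rw [PySem.List.pyGetD_natCast, f1, PySem.List.pySetD_natCast, PySem.List.pySetD_natCast,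
              List.set_set]
            congr 1
            have hupd1 : updF prev b row[b] = 1 := by
              unfold updF
              exact if_pos ⟨hb0, hc.1, hc.2⟩
            rw [hnr, hdropb, hrA2, hupd1,
              List.set_append_right _ _ (by rw [hrAlen]), hrAlen, Nat.sub_self, List.set_cons_zero]
            simp
          · rw [if_neg (by rw [hv, hpv]; exact hc)]
            rw [hnr, hrA2, hdropb]
            have : updF prev b row[b] = row[b] := by
              unfold updF
              rw [if_neg]
              intro hcon
              exact hc ⟨hcon.2.1, hcon.2.2⟩
            rw [this]
            simp

lemma innerZero (z : Int) (hz : z - 1 < 0) (rng : List Int) (a : List (List Int)) :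
    rng.foldl (fun aux j =>
      if z - 1 < 0 ∨ j - 1 < 0 ∨ PySem.List.pyGetD (PySem.List.pyGetD aux z []) j 0 = 0 then
        aux
      else if PySem.List.pyGetD (PySem.List.pyGetD aux z []) j 0 = 240 ∧
              (PySem.List.pyGetD (PySem.List.pyGetD aux (z - 1) []) (j - 1) 0 = 0 ∨
               PySem.List.pyGetD (PySem.List.pyGetD aux (z - 1) []) (j - 1) 0 = 1) then
        PySem.List.pySetD aux z (PySem.List.pySetD (PySem.List.pyGetD aux z []) j 1)
      else aux) a = a := by
  induction rng generalizing a with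
  | nil => rfl
  | cons x xs ih =>
      rw [List.foldl_cons, if_pos (Or.inl hz)]
      exact ih a

lemma outerLoop (img : List (List Int)) (hp : Pre_mBlackTopLeft img) :
    ∀ m, m ≤ img.length →
    (PySem.List.pyRange 0 (m : Int) 1).foldl (fun aux i =>
      (PySem.List.pyRange 0 ((PySem.List.pyGetD aux i []).length : Int) 1).foldl (fun aux j =>
        if i - 1 < 0 ∨ j - 1 < 0 ∨ PySem.List.pyGetD (PySem.List.pyGetD aux i []) j 0 = 0 then
          aux
        else if PySem.List.pyGetD (PySem.List.pyGetD aux i []) j 0 = 240 ∧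
                (PySem.List.pyGetD (PySem.List.pyGetD aux (i - 1) []) (j - 1) 0 = 0 ∨
                 PySem.List.pyGetD (PySem.List.pyGetD aux (i - 1) []) (j - 1) 0 = 1) then
          PySem.List.pySetD aux i (PySem.List.pySetD (PySem.List.pyGetD aux i []) j 1)
        else aux) aux) img
    = (modelRun img).take m ++ img.drop m := by
  intro m
  induction m with
  | zero =>
      intro _
      rw [show ((0:Nat):Int) = 0 from rfl, PySem.List.pyRange_one_eq_nil le_rfl]
      simp
  | succ m ih =>
      intro hm1
      have hm : m < img.length := by omega
      have hr : PySem.List.pyRange 0 ((m+1 : Nat) : Int) 1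
          = PySem.List.pyRange 0 (m:Int) 1 ++ [(m:Int)] := by
        push_cast
        exact PySem.List.pyRange_one_succ_right (by positivity)
      rw [hr, List.foldl_append, ih (by omega)]
      simp only [List.foldl_cons, List.foldl_nil]
      set S := (modelRun img).take m ++ img.drop m with hS
      have hlalt : (modelRun img).length = img.length := length_model img
      have hlt : ((modelRun img).take m).length = m := by
        rw [List.length_take]; omega
      have hSlen : S.length = img.length := by
        rw [hS, List.length_append, hlt, List.length_drop]; omega
      have g1 : S.getD m [] = img.getD m [] := by
        rw [hS, List.getD_eq_getElem?_getD, List.getElem?_append_right (by rw [hlt]), hlt,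
          Nat.sub_self, List.getElem?_drop, Nat.add_zero, ← List.getD_eq_getElem?_getD]
      by_cases hm0 : m = 0
      · subst hm0
        rw [show ((0:Nat):Int) = 0 from rfl, innerZero 0 (by norm_num)]
        rw [hS]
        cases img with
        | nil => simp at hm
        | cons r rest => simp [modelRun]
      · have him : 1 ≤ m := by omega
        rw [PySem.List.pyGetD_natCast, g1]
        rw [innerLoop m him S (by omega) (img.getD m []).length (by rw [g1])]
        rw [g1, List.take_length, List.drop_length, List.append_nil]
        have g2 : S.getD (m-1) [] = (modelRun img).getD (m-1) [] := by
          rw [hS, List.getD_eq_getElem?_getD, List.getElem?_append_left (by rw [hlt]; omega),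
            List.getElem?_take_of_lt (by omega), ← List.getD_eq_getElem?_getD]
        have hrowpre : ∀ j, j < (img.getD m []).length → 1 ≤ j →
            (img.getD m []).getD j 0 = 240 → j - 1 < ((modelRun img).getD (m-1) []).length := by
          intro j hj hj1 h240
          rw [rowlen_model]
          exact hp m hm j hj him hj1 h240
        rw [g2, rowEq _ _ hrowpre]
        have g3 : modelStep ((modelRun img).getD (m-1) []) (img.getD m [])
            = (modelRun img).getD m [] := by
          have h := model_getD_succ img (m-1) (by omega)
          rw [show m - 1 + 1 = m from by omega] at h
          exact h.symm
        rw [g3]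
        rw [hS, List.set_append_right _ _ (by rw [hlt]), hlt, Nat.sub_self]
        rw [List.drop_eq_getElem_cons hm, List.set_cons_zero]
        rw [List.getD_eq_getElem _ _ (by omega : m < (modelRun img).length)]
        have hts : List.take (m+1) (modelRun img)
            = List.take m (modelRun img) ++ [(modelRun img)[m]'(by omega)] := by
          rw [List.take_add_one, List.getElem?_eq_getElem (by omega : m < (modelRun img).length)]
          rfl
        rw [hts, List.append_assoc, List.singleton_append]

lemma A_eq_model (img : List (List Int)) (hpre : Pre_mBlackTopLeft img) :
    mBlackTopLeft img = modelRun img := by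
  unfold mBlackTopLeft
  rw [outerLoop img hpre img.length le_rfl, List.drop_length, List.append_nil,
    ← length_model img, List.take_length]

-- pointwise characterisation of the model (the recurrence A realises)
lemma model_cell (img : List (List Int)) (hpre : Pre_mBlackTopLeft img)
    (a b : Nat) (ha : a < img.length) (hb : b < (img.getD a []).length) :
    ((modelRun img).getD a []).getD b 0 =
      if 1 ≤ a ∧ 1 ≤ b ∧ (img.getD a []).getD b 0 = 240 ∧
         (((modelRun img).getD (a-1) []).getD (b-1) 0 = 0 ∨
          ((modelRun img).getD (a-1) []).getD (b-1) 0 = 1) then 1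
      else (img.getD a []).getD b 0 := by
  cases a with
  | zero =>
      rw [if_neg (by rintro ⟨h, -⟩; omega)]
      cases img with
      | nil => simp at ha
      | cons r rest => rfl
  | succ a =>
      have hs : (modelRun img).getD (a+1) []
          = modelStep ((modelRun img).getD a []) (img.getD (a+1) []) := model_getD_succ img a ha
      have hrowpre : ∀ j, j < (img.getD (a+1) []).length → 1 ≤ j →
          (img.getD (a+1) []).getD j 0 = 240 → j - 1 < ((modelRun img).getD a []).length := by
        intro j hj hj1 h240
        rw [rowlen_model]
        exact hpre (a+1) ha j hj (by omega) hj1 h240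
      rw [hs, ← rowEq _ _ hrowpre]
      have hbe : b < (img.getD (a+1) []).length := hb
      rw [List.getD_eq_getElem _ _ (by rw [length_rowA]; exact hbe)]; simp only [rowA]; rw [List.getElem_mapIdx]
      rw [List.getD_eq_getElem _ _ hbe]
      unfold updF
      have : (1 ≤ a + 1 ∧ 1 ≤ b ∧ (img.getD (a+1) []).getD b 0 = 240 ∧
              (((modelRun img).getD (a+1-1) []).getD (b-1) 0 = 0 ∨
               ((modelRun img).getD (a+1-1) []).getD (b-1) 0 = 1))
          ↔ (b ≠ 0 ∧ (img.getD (a+1) []).getD b 0 = 240 ∧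
              (((modelRun img).getD a []).getD (b-1) 0 = 0 ∨
               ((modelRun img).getD a []).getD (b-1) 0 = 1)) := by
        constructor
        · rintro ⟨-, h1, h2, h3⟩; exact ⟨by omega, h2, by simpa using h3⟩
        · rintro ⟨h1, h2, h3⟩; exact ⟨by omega, by omega, h2, by simpa using h3⟩
      rw [List.getD_eq_getElem _ _ hbe] at this
      rw [if_congr this rfl rfl]

-- the walk of B computes exactly "model value ∈ {0,1} ⇒ marked"
lemma walk_eq_model (img : List (List Int)) (hpre : Pre_mBlackTopLeft img) (v : Int) :
    ∀ a b, a < img.length → b < (img.getD a []).length →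
    cellWalk img a b v =
      (if ((modelRun img).getD a []).getD b 0 = 0 ∨ ((modelRun img).getD a []).getD b 0 = 1
       then 1 else v) := by
  intro a
  induction a using Nat.strong_induction_on with
  | _ a ih =>
      intro b ha hb
      rw [cellWalk]
      have hu : PySem.List.pyGetD (PySem.List.pyGetD img (a : Int) []) (b : Int) 0
          = (img.getD a []).getD b 0 := by
        rw [PySem.List.pyGetD_natCast, PySem.List.pyGetD_natCast]
      have hF := model_cell img hpre a b ha hb
      simp only [hu]
      by_cases h01 : (img.getD a []).getD b 0 = 0 ∨ (img.getD a []).getD b 0 = 1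
      · rw [if_pos h01]
        rw [if_neg (by rintro ⟨-, -, h240, -⟩; rcases h01 with h|h <;> omega)] at hF
        rw [if_pos (by rw [hF]; exact h01)]
      · rw [if_neg h01]
        by_cases hrec : (img.getD a []).getD b 0 = 240 ∧ 1 ≤ a ∧ 1 ≤ b
        · rw [if_pos hrec]
          obtain ⟨h240, ha1, hb1⟩ := hrec
          have hbr : b - 1 < (img.getD (a-1) []).length :=
            hpre a ha b hb ha1 hb1 h240
          rw [ih (a-1) (by omega) (b-1) (by omega) hbr]
          by_cases hc : ((modelRun img).getD (a-1) []).getD (b-1) 0 = 0 ∨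
                        ((modelRun img).getD (a-1) []).getD (b-1) 0 = 1
          · rw [if_pos hc]
            rw [if_pos ⟨ha1, hb1, h240, hc⟩] at hF
            rw [if_pos (by rw [hF]; norm_num)]
          · rw [if_neg hc]
            rw [if_neg (by rintro ⟨-, -, -, h⟩; exact hc h)] at hF
            rw [if_neg (by rw [hF, h240]; norm_num)]
        · rw [if_neg hrec]
          rw [if_neg (by rintro ⟨h1, h2, h3, -⟩; exact hrec ⟨h3, h1, h2⟩)] at hF
          rw [if_neg (by rw [hF]; exact h01)]

lemma alt_eq_model (img : List (List Int)) (hpre : Pre_mBlackTopLeft img) :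
    mBlackTopLeft_alt img = modelRun img := by
  apply List.ext_getElem (by simp [mBlackTopLeft_alt, length_model])
  intro i hi1 hi2
  have hii : i < img.length := by simpa [mBlackTopLeft_alt] using hi1
  simp only [mBlackTopLeft_alt]; rw [List.getElem_mapIdx]
  apply List.ext_getElem (by rw [List.length_mapIdx, ← List.getD_eq_getElem img [] hii, ← rowlen_model img i, List.getD_eq_getElem _ _ hi2])
  intro j hj1 hj2
  have hjj : j < (img.getD i []).length := by
    rw [List.getD_eq_getElem _ _ hii]; simpa using hj1
  have hjj2 : j < img[i].length := by rwa [List.getD_eq_getElem _ _ hii] at hjj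
  rw [List.getElem_mapIdx]
  have hv : img[i][j] = (img.getD i []).getD j 0 := by
    rw [List.getD_eq_getElem _ _ hii, List.getD_eq_getElem]
  have hF := model_cell img hpre i j hii hjj
  have hgm : (modelRun img)[i][j] = ((modelRun img).getD i []).getD j 0 := by
    rw [List.getD_eq_getElem _ _ hi2, List.getD_eq_getElem]
  rw [hgm]
  unfold cellB
  by_cases hskip : img[i][j] ≠ 240 ∨ i < 1 ∨ j < 1
  · rw [if_pos hskip]
    have : ¬(1 ≤ i ∧ 1 ≤ j ∧ (img.getD i []).getD j 0 = 240 ∧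
        (((modelRun img).getD (i-1) []).getD (j-1) 0 = 0 ∨
         ((modelRun img).getD (i-1) []).getD (j-1) 0 = 1)) := by
      rintro ⟨h1, h2, h3, -⟩
      rcases hskip with h|h|h
      · exact h (by rw [hv]; exact h3)
      · omega
      · omega
    rw [if_neg this] at hF
    rw [hF, hv]
  · rw [if_neg hskip]
    push Not at hskip
    obtain ⟨h240, hi1', hj1'⟩ := hskip
    have h240' : (img.getD i []).getD j 0 = 240 := by rw [← hv]; exact h240
    have hbr : j - 1 < (img.getD (i-1) []).length :=
      hpre i hii j hjj hi1' hj1' h240'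
    have har : i - 1 < img.length := by omega
    rw [walk_eq_model img hpre _ (i-1) (j-1) har hbr]
    by_cases hc : ((modelRun img).getD (i-1) []).getD (j-1) 0 = 0 ∨
                  ((modelRun img).getD (i-1) []).getD (j-1) 0 = 1
    · rw [if_pos hc, if_pos ⟨hi1', hj1', h240', hc⟩] at *
      rw [hF]
    · rw [if_neg hc]
      rw [if_neg (by rintro ⟨-, -, -, h⟩; exact hc h)] at hF
      rw [hF]
      exact hv

-- ===== VERDICT (by name: the statement is the Claim_ definition above) =====
theorem mBlackTopLeft_spec : Claim_equal_mBlackTopLeft := by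
  intro img _ hpre
  unfold Spec_mBlackTopLeft
  rw [A_eq_model img hpre, alt_eq_model img hpre]
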